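-- pv_equiv track=rewrite | github.com/Niranjan2048/Indian_stockbot | main.py | get_final_sentiment
-- ===== SOURCE A (Python) =====
-- def get_final_sentiment(sentiments):
--     positive_count = sum(1 for sentiment in sentiments if sentiment > 0)
--     negative_count = sum(1 for sentiment in sentiments if sentiment < 0)
--
--     if positive_count > negative_count:
--         return "Positive"
--     elif negative_count > positive_count:
--         return "Negative"
--     else:
--         return "Neutral"
-- ===== SOURCE B (Python) =====
-- def get_final_sentiment(sentiments):
--     net = sum((s > 0) - (s < 0) for s in sentiments)
--     return {1: "Positive", -1: "Negative", 0: "Neutral"}[(net > 0) - (net < 0)]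
-- ===== Notes on version B (the rewrite author's own statement) =====
-- stated objective: alternative
-- what changed: B computes one signed net score as a sum of arithmetic signs (s>0)-(s<0) in a single comprehension and classifies by looking the sign of the net up in a literal table, instead of A's two separate filtered-count passes and if/elif chain.
import Mathlib
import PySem

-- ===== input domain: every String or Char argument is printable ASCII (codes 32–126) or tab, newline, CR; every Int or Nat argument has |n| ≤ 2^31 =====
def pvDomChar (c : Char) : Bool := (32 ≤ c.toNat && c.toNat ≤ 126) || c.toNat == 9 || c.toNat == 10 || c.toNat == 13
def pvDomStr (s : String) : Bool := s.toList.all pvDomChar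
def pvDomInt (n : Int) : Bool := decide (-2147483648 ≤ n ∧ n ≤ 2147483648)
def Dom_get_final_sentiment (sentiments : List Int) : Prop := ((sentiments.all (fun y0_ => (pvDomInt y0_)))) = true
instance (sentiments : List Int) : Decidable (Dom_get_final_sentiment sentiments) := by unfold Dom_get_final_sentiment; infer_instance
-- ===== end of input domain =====

-- B sums arithmetic signs (s>0)-(s<0) in one pass and classifies via a sign → label lookup table, instead of A's two filtered-count passes and if/elif chain.

-- ===== PORT A =====
def get_final_sentiment (sentiments : List Int) : String :=
  -- positive_count = sum(1 for sentiment in sentiments if sentiment > 0)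
  let positive_count : Int := sentiments.foldl (fun acc s => if s > 0 then acc + 1 else acc) 0
  -- negative_count = sum(1 for sentiment in sentiments if sentiment < 0)
  let negative_count : Int := sentiments.foldl (fun acc s => if s < 0 then acc + 1 else acc) 0
  if positive_count > negative_count then "Positive"
  else if negative_count > positive_count then "Negative"
  else "Neutral"

-- ===== PORT B =====
-- B: net = sum((s > 0) - (s < 0) for s in sentiments); table lookup on (net>0)-(net<0).
-- The .getD "" only totalises the lookup; the key sign is always 1, -1 or 0, so it always hits.
def get_final_sentiment_alt (sentiments : List Int) : String :=
  let net : Int :=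
    (sentiments.map (fun s => (if s > 0 then (1:Int) else 0) - (if s < 0 then (1:Int) else 0))).sum
  let key : Int := (if net > 0 then (1:Int) else 0) - (if net < 0 then (1:Int) else 0)
  ((PySem.Dict.ofList [((1:Int), "Positive"), (-1, "Negative"), (0, "Neutral")]).get? key).getD ""

-- ===== PRECONDITION & SPEC =====
def Spec_get_final_sentiment (sentiments : List Int) (out : String) : Prop := out = get_final_sentiment_alt sentiments
instance (sentiments : List Int) (out : String) : Decidable (Spec_get_final_sentiment sentiments out) := by unfold Spec_get_final_sentiment; infer_instance

-- ===== CLAIM (what is proved, stated in full; the proofs are below) =====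
def Claim_equal_get_final_sentiment : Prop := ∀ (sentiments : List Int), Dom_get_final_sentiment sentiments → Spec_get_final_sentiment sentiments (get_final_sentiment sentiments)

-- ===== LEMMAS AND PROOFS =====

-- B's sign-sum equals A's positive count minus A's negative count (counts started at p, n).
theorem pv_sum_signs_eq_counts (sentiments : List Int) (p n : Int) :
    (sentiments.map (fun s => (if s > 0 then (1:Int) else 0) - (if s < 0 then (1:Int) else 0))).sum
      + sentiments.foldl (fun acc s => if s < 0 then acc + 1 else acc) n
    = sentiments.foldl (fun acc s => if s > 0 then acc + 1 else acc) p + (n - p) := by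
  induction sentiments generalizing p n with
  | nil => simp
  | cons x xs ih =>
    simp only [List.map, List.sum_cons, List.foldl]
    by_cases h1 : x > 0
    · simp only [if_pos h1, if_neg (show ¬ x < 0 by omega)]
      have := ih (p + 1) n; omega
    · by_cases h2 : x < 0
      · simp only [if_neg h1, if_pos h2]
        have := ih p (n + 1); omega
      · simp only [if_neg h1, if_neg h2]
        have := ih p n; omega

-- evaluating B's sign-key table lookup for each of the three possible keys
theorem pv_key_lookup (net : Int) :
    ((PySem.Dict.ofList [((1:Int), "Positive"), (-1, "Negative"), (0, "Neutral")]).get?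
        ((if net > 0 then (1:Int) else 0) - (if net < 0 then (1:Int) else 0))).getD ""
    = if net > 0 then "Positive" else if net < 0 then "Negative" else "Neutral" := by
  by_cases h1 : net > 0
  · simp only [if_pos h1, if_neg (show ¬ net < 0 by omega)]; decide
  · by_cases h2 : net < 0
    · simp only [if_neg h1, if_pos h2]; decide
    · simp only [if_neg h1, if_neg h2]; decide

theorem pv_A_char (xs : List Int) :
    get_final_sentiment xs =
      (if xs.foldl (fun acc s => if s > 0 then acc + 1 else acc) (0:Int)
            > xs.foldl (fun acc s => if s < 0 then acc + 1 else acc) (0:Int) then "Positive"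
       else if xs.foldl (fun acc s => if s < 0 then acc + 1 else acc) (0:Int)
            > xs.foldl (fun acc s => if s > 0 then acc + 1 else acc) (0:Int) then "Negative"
       else "Neutral") := rfl

theorem pv_B_char (xs : List Int) :
    get_final_sentiment_alt xs =
      (if (xs.map (fun s => (if s > 0 then (1:Int) else 0) - (if s < 0 then (1:Int) else 0))).sum > 0 then "Positive"
       else if (xs.map (fun s => (if s > 0 then (1:Int) else 0) - (if s < 0 then (1:Int) else 0))).sum < 0 then "Negative"
       else "Neutral") :=
  pv_key_lookup _

-- ===== VERDICT (by name: the statement is the Claim_ definition above) =====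
theorem get_final_sentiment_spec : Claim_equal_get_final_sentiment := by
  intro xs _
  unfold Spec_get_final_sentiment
  rw [pv_A_char, pv_B_char]
  have h := pv_sum_signs_eq_counts xs (0:Int) (0:Int)
  split_ifs <;> first | rfl | omega
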